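-- pv_equiv track=rewrite | github.com/whynotramaa/Leetcode | Before09Dec/stackQueue.py | nextSmallerElements
-- ===== SOURCE A (Python) =====
-- from typing import List
--
-- def nextSmallerElements(nums: List[int]) -> List[int]:
--     stack = []
--     res = [-1]*len(nums)
--
--     for i in range(2*len(nums)-1,-1,-1):
--         current = nums[i%len(nums)]
--         while stack and stack[-1] >= current:
--             stack.pop()
--         if i<len(nums):
--             if stack:
--                 res[i] = stack[-1]
--         stack.append(current)
--     return res
-- ===== SOURCE B (Python) =====
-- from typing import List
--
-- def nextSmallerElements(nums: List[int]) -> List[int]: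
--     n = len(nums)
--     res = []
--     for i in range(n):
--         ans = -1
--         for d in range(1, n):
--             x = nums[(i + d) % n]
--             if x < nums[i]:
--                 ans = x
--                 break
--         res.append(ans)
--     return res
-- ===== Notes on version B (the rewrite author's own statement) =====
-- stated objective: simpler
-- what changed: Replaces the backward monotonic-stack pass over 2n virtual indices with a plain per-index circular forward scan that returns the first strictly smaller element.
import Mathlib
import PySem

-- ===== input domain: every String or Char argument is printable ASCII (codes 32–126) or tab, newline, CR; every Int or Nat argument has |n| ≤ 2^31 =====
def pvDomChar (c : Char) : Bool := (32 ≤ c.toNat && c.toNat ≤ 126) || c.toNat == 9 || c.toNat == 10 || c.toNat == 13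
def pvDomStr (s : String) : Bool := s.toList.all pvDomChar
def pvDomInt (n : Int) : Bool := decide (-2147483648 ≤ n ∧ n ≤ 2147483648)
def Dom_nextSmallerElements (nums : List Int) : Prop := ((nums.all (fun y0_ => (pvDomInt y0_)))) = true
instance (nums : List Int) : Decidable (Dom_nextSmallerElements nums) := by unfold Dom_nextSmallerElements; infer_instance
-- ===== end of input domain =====

-- B replaces A's backward monotonic-stack pass by a plain per-index circular scan (simpler, not faster).

-- ===== PORT A =====
-- Backward loop for i = 2n-1 .. 0; stack of VALUES (list head = Python stack[-1]); pop while top >= current.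
-- `nums.getD (k % nums.length) 0` is exact for Python `nums[i % len(nums)]`: the loop body only runs when
-- len(nums) > 0, and then 0 ≤ i % n < n, so the index is always in range.
def goA (nums : List Int) : Nat → List Int → List Int → List Int
  | 0, _, res => res
  | k+1, stack, res =>
    goA nums k
      (nums.getD (k % nums.length) 0 ::
        stack.dropWhile (fun t => decide (nums.getD (k % nums.length) 0 ≤ t)))
      (if k < nums.length then
        match stack.dropWhile (fun t => decide (nums.getD (k % nums.length) 0 ≤ t)) with
        | [] => res
        | t :: _ => res.set k t
      else res)

def nextSmallerElements (nums : List Int) : List Int :=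
  goA nums (2 * nums.length) [] (List.replicate nums.length (-1))

-- ===== PORT B =====
-- For each i, scan offsets d = 1 .. n-1 circularly and return the first value < nums[i], else -1.
def goB (nums : List Int) (i : Nat) (c : Int) (d : Nat) : Int :=
  if d < nums.length then
    if nums.getD ((i + d) % nums.length) 0 < c then nums.getD ((i + d) % nums.length) 0
    else goB nums i c (d+1)
  else -1
termination_by nums.length - d

def nextSmallerElements_alt (nums : List Int) : List Int :=
  (List.range nums.length).map (fun i => goB nums i (nums.getD i 0) 1)

-- ===== PRECONDITION & SPEC =====
def Spec_nextSmallerElements (nums : List Int) (out : List Int) : Prop := out = nextSmallerElements_alt nums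
instance (nums : List Int) (out : List Int) : Decidable (Spec_nextSmallerElements nums out) := by unfold Spec_nextSmallerElements; infer_instance

-- ===== CLAIM (what is proved, stated in full; the proofs are below) =====
def Claim_equal_nextSmallerElements : Prop := ∀ (nums : List Int), Dom_nextSmallerElements nums → Spec_nextSmallerElements nums (nextSmallerElements nums)

-- ===== LEMMAS AND PROOFS =====

-- value at virtual (circular) position j
def vC (nums : List Int) (j : Nat) : Int := nums.getD (j % nums.length) 0

-- stack contents after m iterations of A's backward loop (head = top)
def TC (nums : List Int) : Nat → List Int
  | 0 => []
  | m+1 => vC nums (2 * nums.length - 1 - m) ::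
      (TC nums m).dropWhile (fun t => decide (vC nums (2 * nums.length - 1 - m) ≤ t))

-- first value < c among virtual positions 2n-m .. 2n-1 (scanned in ascending order)
def FC (nums : List Int) : Nat → Int → Option Int
  | 0, _ => none
  | m+1, c =>
    if vC nums (2 * nums.length - 1 - m) < c then some (vC nums (2 * nums.length - 1 - m))
    else FC nums m c

theorem dropWhile_dropWhile {α : Type} (p q : α → Bool)
    (h : ∀ t, q t = true → p t = true) :
    ∀ l : List α, (l.dropWhile q).dropWhile p = l.dropWhile p := by
  intro l
  induction l with
  | nil => rfl
  | cons a l ih =>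
    rw [List.dropWhile_cons]
    by_cases hq : q a = true
    · rw [if_pos hq, ih, List.dropWhile_cons, if_pos (h a hq)]
    · rw [if_neg hq]

theorem L_stack (nums : List Int) :
    ∀ (m : Nat) (c : Int),
      ((TC nums m).dropWhile (fun t => decide (c ≤ t))).head? = FC nums m c := by
  intro m
  induction m with
  | zero => intro c; simp [TC, FC]
  | succ m ih =>
    intro c
    simp only [TC, FC]
    by_cases h : vC nums (2 * nums.length - 1 - m) < c
    · have hd : decide (c ≤ vC nums (2 * nums.length - 1 - m)) = false :=
        decide_eq_false (by omega)
      rw [List.dropWhile_cons, hd, if_pos h]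
      simp
    · have hd : decide (c ≤ vC nums (2 * nums.length - 1 - m)) = true :=
        decide_eq_true (by omega)
      rw [List.dropWhile_cons, hd, if_neg h]
      simp only [if_true]
      rw [dropWhile_dropWhile (fun t => decide (c ≤ t))
        (fun t => decide (vC nums (2 * nums.length - 1 - m) ≤ t))
        (by intro t ht; simp only [decide_eq_true_eq] at ht ⊢; omega), ih]

theorem F_find (nums : List Int) :
    ∀ (m : Nat), m ≤ 2 * nums.length → ∀ c,
      FC nums m c =
        ((List.range' (2 * nums.length - m) m).map (vC nums)).find? (fun x => decide (x < c)) := by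
  intro m
  induction m with
  | zero => intro _ c; simp [FC]
  | succ m ih =>
    intro hm c
    have h1 : 2 * nums.length - (m+1) + 1 = 2 * nums.length - m := by omega
    have h2 : 2 * nums.length - 1 - m = 2 * nums.length - (m+1) := by omega
    rw [List.range'_succ, h1, List.map_cons, List.find?_cons]
    simp only [FC, h2]
    by_cases h : vC nums (2 * nums.length - (m+1)) < c
    · simp [h]
    · simp [h, ih (by omega)]

theorem goB_find (nums : List Int) (i : Nat) (c : Int) :
    ∀ (f d : Nat), nums.length - d = f →
      goB nums i c d =
        (((List.range' d (nums.length - d)).map (fun e => vC nums (i + e))).find?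
          (fun x => decide (x < c))).getD (-1) := by
  intro f
  induction f with
  | zero =>
    intro d hd
    have hdn : ¬ d < nums.length := by omega
    rw [goB, if_neg hdn, hd]
    simp
  | succ f ih =>
    intro d hd
    have hdn : d < nums.length := by omega
    have h1 : nums.length - d = (nums.length - (d+1)) + 1 := by omega
    rw [goB, if_pos hdn, h1]
    simp only [List.range'_succ, List.map_cons, List.find?_cons]
    by_cases h : nums.getD ((i + d) % nums.length) 0 < c
    · have hdt : decide (vC nums (i + d) < c) = true := decide_eq_true h
      rw [if_pos h, hdt]
      rfl
    · have hdf : decide (vC nums (i + d) < c) = false := decide_eq_false h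
      rw [if_neg h, hdf]
      exact ih (d+1) (by omega)

theorem vC_period (nums : List Int) (j : Nat) : vC nums (j + nums.length) = vC nums j := by
  simp [vC, Nat.add_mod_right]

-- bridge: A's query over positions i+1 .. 2n-1 equals B's scan over offsets 1 .. n-1
theorem bridge (nums : List Int) (i : Nat) (hi : i < nums.length) :
    (FC nums (2 * nums.length - 1 - i) (vC nums i)).getD (-1) = goB nums i (vC nums i) 1 := by
  have hm : 2 * nums.length - 1 - i ≤ 2 * nums.length := by omega
  rw [F_find nums _ hm, goB_find nums i (vC nums i) (nums.length - 1) 1 (by omega)]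
  have h0 : 2 * nums.length - (2 * nums.length - 1 - i) = i + 1 := by omega
  rw [h0]
  have hr : (List.range' (i+1) (2 * nums.length - 1 - i)).map (vC nums) =
      ((List.range' 1 (nums.length - 1)).map (fun e => vC nums (i + e))) ++
      ((List.range' nums.length (nums.length - i)).map (fun e => vC nums (i + e))) := by
    have hsplit : 2 * nums.length - 1 - i = (nums.length - 1) + (nums.length - i) := by omega
    rw [hsplit, ← List.range'_append]
    have e1 : (List.range' 1 (nums.length - 1)).map (fun x => i + x) =
        List.range' (i + 1) (nums.length - 1) := List.map_add_range' 1 (nums.length - 1) 1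
    have e2 : (List.range' nums.length (nums.length - i)).map (fun x => i + x) =
        List.range' (i + nums.length) (nums.length - i) := List.map_add_range' nums.length _ 1
    have h3 : i + 1 + 1 * (nums.length - 1) = i + nums.length := by omega
    rw [h3, List.map_append, ← e1, ← e2, List.map_map, List.map_map]
    simp [Function.comp_def]
  rw [hr, List.find?_append]
  by_cases hfind : ((List.range' 1 (nums.length - 1)).map (fun e => vC nums (i + e))).find?
      (fun x => decide (x < vC nums i)) = none
  · rw [hfind, Option.none_or]
    have hnone2 : ((List.range' nums.length (nums.length - i)).map (fun e => vC nums (i + e))).find?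
        (fun x => decide (x < vC nums i)) = none := by
      rw [List.find?_eq_none]
      intro x hx
      simp only [List.mem_map] at hx
      obtain ⟨e, he, rfl⟩ := hx
      have hmem := List.mem_range'_1.mp he
      simp only [decide_eq_true_eq, not_lt]
      rcases Nat.eq_or_lt_of_le hmem.1 with heq | hlt
      · -- e = n : value is vC nums (i+n) = vC nums i
        rw [← heq, vC_period nums i]
      · -- e > n : same value as offset e - n, which the first part already rejected
        have he' : e - nums.length ∈ List.range' 1 (nums.length - 1) := by
          rw [List.mem_range'_1]; omega
        have hval : vC nums (i + e) = vC nums (i + (e - nums.length)) := by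
          have h4 : i + e = (i + (e - nums.length)) + nums.length := by omega
          rw [h4, vC_period]
        have h5 := List.find?_eq_none.mp hfind (vC nums (i + (e - nums.length)))
          (List.mem_map.mpr ⟨e - nums.length, he', rfl⟩)
        simp only [decide_eq_true_eq, not_lt] at h5
        omega
    rw [hnone2]
  · obtain ⟨x, hx⟩ := Option.ne_none_iff_exists'.mp hfind
    rw [hx, Option.some_or]

-- A's loop invariant: with stack TC (2n-k) entering the iterations k-1 .. 0, each processed slot
-- i < k ends up holding the head of the popped stack (or its previous value if the stack emptied).
theorem goA_inv (nums : List Int) :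
    ∀ (k : Nat), k ≤ 2 * nums.length → ∀ (res : List Int), res.length = nums.length →
      (goA nums k (TC nums (2 * nums.length - k)) res).length = nums.length ∧
      ∀ i, i < nums.length →
        (goA nums k (TC nums (2 * nums.length - k)) res)[i]? =
          if i < k then
            some ((((TC nums (2 * nums.length - 1 - i)).dropWhile
              (fun t => decide (vC nums i ≤ t))).head?).getD (res.getD i 0))
          else res[i]? := by
  intro k
  induction k with
  | zero =>
    intro _ res hres
    refine ⟨by simpa [goA] using hres, ?_⟩
    intro i hi
    simp [goA]
  | succ k ih =>
    intro hk res hres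
    have hT : TC nums (2 * nums.length - k) =
        nums.getD (k % nums.length) 0 ::
          (TC nums (2 * nums.length - (k+1))).dropWhile
            (fun t => decide (nums.getD (k % nums.length) 0 ≤ t)) := by
      have h1 : 2 * nums.length - k = (2 * nums.length - (k+1)) + 1 := by omega
      have h2 : 2 * nums.length - 1 - (2 * nums.length - (k+1)) = k := by omega
      rw [h1]
      show vC nums (2 * nums.length - 1 - (2 * nums.length - (k + 1))) :: _ = _
      rw [h2]
      rfl
    have hstep : goA nums (k+1) (TC nums (2 * nums.length - (k+1))) res =
        goA nums k (TC nums (2 * nums.length - k))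
          (if k < nums.length then
            match (TC nums (2 * nums.length - (k+1))).dropWhile
                (fun t => decide (nums.getD (k % nums.length) 0 ≤ t)) with
            | [] => res
            | t :: _ => res.set k t
          else res) := by
      rw [goA, hT]
    have hres'len : (if k < nums.length then
        match (TC nums (2 * nums.length - (k+1))).dropWhile
            (fun t => decide (nums.getD (k % nums.length) 0 ≤ t)) with
        | [] => res
        | t :: _ => res.set k t
      else res).length = nums.length := by
      split
      · split
        · exact hres
        · simp [hres]
      · exact hres
    obtain ⟨ihlen, ihval⟩ := ih (by omega) _ hres'len
    refine ⟨by rw [hstep]; exact ihlen, ?_⟩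
    intro i hi
    rw [hstep, ihval i hi]
    have hcur : nums.getD (k % nums.length) 0 = vC nums k := rfl
    by_cases hik : i < k
    · -- slot i was already written before this iteration; this iteration does not touch it
      have hget : (if k < nums.length then
          match (TC nums (2 * nums.length - (k+1))).dropWhile
              (fun t => decide (nums.getD (k % nums.length) 0 ≤ t)) with
          | [] => res
          | t :: _ => res.set k t
        else res).getD i 0 = res.getD i 0 := by
        split
        · split
          · rfl
          · simp only [List.getD_eq_getElem?_getD]
            rw [List.getElem?_set_ne (by omega)]
        · rfl
      rw [if_pos hik, if_pos (Nat.lt_succ_of_lt hik), hget]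
    · by_cases hik' : i = k
      · subst hik'
        rw [if_neg hik, if_pos (Nat.lt_succ_self i), if_pos hi]
        have hidx : 2 * nums.length - (i+1) = 2 * nums.length - 1 - i := by omega
        rw [hidx]
        have hfun : (fun t => decide (nums.getD (i % nums.length) 0 ≤ t)) =
            (fun t => decide (vC nums i ≤ t)) := rfl
        rw [hfun]
        cases hs : (TC nums (2 * nums.length - 1 - i)).dropWhile
            (fun t => decide (vC nums i ≤ t)) with
        | nil =>
          simp [List.getD_eq_getElem?_getD,
            List.getElem?_eq_getElem (show i < res.length by omega)]
        | cons t ts =>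
          simp only [List.head?_cons, Option.getD_some]
          rw [List.getElem?_set_self (by omega)]
      · -- i > k : untouched and not yet claimed written
        have h1 : ¬ i < k + 1 := by omega
        have hget : (if k < nums.length then
            match (TC nums (2 * nums.length - (k+1))).dropWhile
                (fun t => decide (nums.getD (k % nums.length) 0 ≤ t)) with
            | [] => res
            | t :: _ => res.set k t
          else res)[i]? = res[i]? := by
          split
          · split
            · rfl
            · rw [List.getElem?_set_ne (by omega)]
          · rfl
        rw [if_neg hik, if_neg h1, hget]

-- ===== VERDICT (by name: the statement is the Claim_ definition above) =====
theorem nextSmallerElements_spec : Claim_equal_nextSmallerElements := by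
  intro nums _
  unfold Spec_nextSmallerElements nextSmallerElements nextSmallerElements_alt
  have h0 : 2 * nums.length - 2 * nums.length = 0 := by omega
  obtain ⟨hlen, hval⟩ := goA_inv nums (2 * nums.length) (le_refl _)
    (List.replicate nums.length (-1)) (by simp)
  rw [h0] at hlen hval
  have hT0 : TC nums 0 = [] := rfl
  rw [hT0] at hlen hval
  apply List.ext_getElem?
  intro i
  by_cases hi : i < nums.length
  · rw [hval i hi]
    have h2 : i < 2 * nums.length := by omega
    have hrep : (List.replicate nums.length (-1 : Int)).getD i 0 = -1 := by
      simp [List.getD_eq_getElem?_getD, hi]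
    rw [if_pos h2, hrep, L_stack nums (2 * nums.length - 1 - i) (vC nums i), bridge nums i hi]
    have hvi : nums.getD i 0 = vC nums i := by
      simp [vC, Nat.mod_eq_of_lt hi]
    rw [List.getElem?_map, List.getElem?_range hi]
    simp only [Option.map_some]
    rw [hvi]
  · have h1 : (goA nums (2 * nums.length) [] (List.replicate nums.length (-1)))[i]? = none := by
      rw [List.getElem?_eq_none]; omega
    have h2 : ((List.range nums.length).map (fun i => goB nums i (nums.getD i 0) 1))[i]? = none := by
      rw [List.getElem?_eq_none]; simp; omega
    rw [h1, h2]
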